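-- pv_equiv track=rewrite | github.com/niracler/python-exercise | interview_question/interview_question.py | quest1
-- ===== SOURCE A (Python) =====
-- def quest1(a):
--     res = []
--     for i in range(1, len(a) // 2 + 1):
--         res.append(a[-i])
--         res.append(a[i - 1])
--
--     if len(a) % 2:
--         res.append(a[len(a) // 2])
--
--     return res
-- ===== SOURCE B (Python) =====
-- def quest1(a):
--     # Loop-free construction: even output slots are a reversed prefix,
--     # odd output slots are a front prefix, written by strided slice assignment.
--     n = len(a)
--     res = [0] * n
--     res[0::2] = a[::-1][:(n + 1) // 2]
--     res[1::2] = a[:n // 2]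
--     return res
-- ===== Notes on version B (the rewrite author's own statement) =====
-- stated objective: alternative
-- what changed: Replaces A's Python-level loop over range(1, n//2+1) with two indexed appends per step by a loop-free construction: allocate the result and fill its even slots with a reversed prefix a[::-1][:(n+1)//2] and its odd slots with a[:n//2] via strided slice assignment (the odd middle lands in the last even slot).
import Mathlib
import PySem

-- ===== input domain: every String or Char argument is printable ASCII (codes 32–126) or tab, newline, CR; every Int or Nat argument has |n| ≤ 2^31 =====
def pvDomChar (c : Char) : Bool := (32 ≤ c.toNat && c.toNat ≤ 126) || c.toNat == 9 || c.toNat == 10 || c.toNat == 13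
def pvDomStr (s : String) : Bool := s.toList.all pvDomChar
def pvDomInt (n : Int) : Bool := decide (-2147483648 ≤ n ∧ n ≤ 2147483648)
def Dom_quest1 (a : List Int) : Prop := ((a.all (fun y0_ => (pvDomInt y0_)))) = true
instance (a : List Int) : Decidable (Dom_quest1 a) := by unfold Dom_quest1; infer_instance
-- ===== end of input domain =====

-- B replaces A's per-element end-indexing loop by a loop-free strided-slice construction: even output slots get a reversed prefix, odd slots a front prefix.

-- ===== PORT A =====
def quest1 (a : List Int) : List Int :=
  let n : Int := a.length
  let res : List Int :=
    (PySem.List.pyRange 1 (PySem.Int.floordiv n 2 + 1) 1).foldl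
      (fun res i => res ++ [PySem.List.pyGetD a (-i) 0] ++ [PySem.List.pyGetD a (i - 1) 0]) []
  if PySem.Int.mod n 2 ≠ 0 then
    res ++ [PySem.List.pyGetD a (PySem.Int.floordiv n 2) 0]
  else res

-- ===== PORT B =====
/-- Hand port of the strided slice assignments `res[0::2] = ev; res[1::2] = od`
    (PySem has no primitive for extended-slice assignment): writing ev to the even
    slots and od to the odd slots of a fresh list of length ev.length + od.length
    is exactly this interleave whenever ev.length ∈ {od.length, od.length + 1},
    which holds for the two prefixes B builds (Python raises ValueError otherwise,
    a case B's slices never produce). -/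
def stridedFill : List Int → List Int → List Int
  | e :: es, o :: os => e :: o :: stridedFill es os
  | e :: _, [] => [e]
  | [], _ => []

def quest1_alt (a : List Int) : List Int :=
  let n := a.length
  let ev := a.reverse.take ((n + 1) / 2)
  let od := a.take (n / 2)
  stridedFill ev od

-- ===== PRECONDITION & SPEC =====
def Spec_quest1 (a : List Int) (out : List Int) : Prop := out = quest1_alt a
instance (a : List Int) (out : List Int) : Decidable (Spec_quest1 a out) := by unfold Spec_quest1; infer_instance

-- ===== CLAIM (what is proved, stated in full; the proofs are below) =====
def Claim_equal_quest1 : Prop := ∀ (a : List Int), Dom_quest1 a → Spec_quest1 a (quest1 a)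

-- ===== LEMMAS AND PROOFS =====

/-- Common characterisation both ports are proved equal to. -/
def interleaveSpec (a : List Int) : List Int :=
  (List.range (a.length / 2)).flatMap
      (fun k => [a.getD (a.length - 1 - k) 0, a.getD k 0])
    ++ (if a.length % 2 = 0 then [] else [a.getD (a.length / 2) 0])

/-- Generic loop shape: appending two singletons per element is a flatMap of pairs. -/
theorem foldl_append_pair {α β : Type} (g1 g2 : α → β) (l : List α) (init : List β) :
    l.foldl (fun res x => res ++ [g1 x] ++ [g2 x]) init = init ++ l.flatMap (fun x => [g1 x, g2 x]) := by
  induction l generalizing init with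
  | nil => simp
  | cons x xs ih => simp [List.foldl_cons, List.append_assoc, List.flatMap_def]

theorem quest1_eq_spec (a : List Int) : quest1 a = interleaveSpec a := by
  unfold quest1 interleaveSpec
  dsimp only
  have hfd : PySem.Int.floordiv ((a.length : Int)) 2 = ((a.length / 2 : Nat) : Int) := by
    exact_mod_cast PySem.Int.floordiv_natCast a.length 2
  have hmd : PySem.Int.mod ((a.length : Int)) 2 = ((a.length % 2 : Nat) : Int) := by
    exact_mod_cast PySem.Int.mod_natCast a.length 2
  rw [hfd, hmd]
  have htn : (((a.length / 2 : Nat) : Int) + 1 - 1).toNat = a.length / 2 := by omega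
  have hmain :
      (PySem.List.pyRange 1 (((a.length / 2 : Nat) : Int) + 1) 1).foldl
        (fun res i => res ++ [PySem.List.pyGetD a (-i) 0] ++ [PySem.List.pyGetD a (i - 1) 0]) []
      = (List.range (a.length / 2)).flatMap
          (fun k => [a.getD (a.length - 1 - k) 0, a.getD k 0]) := by
    rw [foldl_append_pair, PySem.List.pyRange_one, htn, List.flatMap_map, List.nil_append]
    apply List.flatMap_congr
    intro k hk
    have hk' : k < a.length / 2 := List.mem_range.mp hk
    have e1 : (-((1 : Int) + (k : Int))) = -(((k + 1 : Nat)) : Int) := by omega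
    have e2 : ((1 : Int) + (k : Int) - 1) = ((k : Nat) : Int) := by omega
    rw [e1, e2, PySem.List.pyGetD_neg_natCast a (k + 1) 0 (by omega) (by omega),
      PySem.List.pyGetD_natCast]
    rw [List.getD_eq_getElem a 0 (by omega : a.length - 1 - k < a.length)]
    have : a.length - (k + 1) = a.length - 1 - k := by omega
    simp [this]
  rw [hmain]
  by_cases hpar : a.length % 2 = 0
  · simp [hpar]
  · have hne : ((a.length % 2 : Nat) : Int) ≠ 0 := by exact_mod_cast hpar
    simp only [hne, hpar, ne_eq, not_false_iff, if_true, if_false]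
    rw [PySem.List.pyGetD_natCast]

theorem stridedFill_flat (Y X : List Int)
    (h : X.length = Y.length ∨ X.length = Y.length + 1) :
    stridedFill X Y
      = (List.range Y.length).flatMap (fun k => [X.getD k 0, Y.getD k 0])
        ++ (if X.length = Y.length + 1 then [X.getD Y.length 0] else []) := by
  induction Y generalizing X with
  | nil =>
    match X, h with
    | [], _ => simp [stridedFill]
    | [e], _ => simp [stridedFill]
  | cons o os ih =>
    match X, h with
    | e :: es, h =>
      have h' : es.length = os.length ∨ es.length = os.length + 1 := by
        simp at h; omega
      rw [show stridedFill (e :: es) (o :: os) = e :: o :: stridedFill es os from rfl,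
        ih es h']
      rw [List.length_cons, List.range_succ_eq_map, List.flatMap_cons, List.flatMap_map]
      simp only [Nat.succ_eq_add_one, List.getD_cons_zero, List.getD_cons_succ,
        List.length_cons, Nat.add_right_cancel_iff]
      simp [List.flatMap_def]

theorem alt_eq_spec (a : List Int) : quest1_alt a = interleaveSpec a := by
  unfold quest1_alt interleaveSpec
  dsimp only
  set n := a.length with hn
  have hev : (a.reverse.take ((n + 1) / 2)).length = (n + 1) / 2 := by
    simp [hn]; omega
  have hod : (a.take (n / 2)).length = n / 2 := by
    simp [hn]; omega
  rw [stridedFill_flat _ _ (by rw [hev, hod]; omega)]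
  have hevget : ∀ k : Nat, k < (n + 1) / 2 →
      (a.reverse.take ((n + 1) / 2)).getD k 0 = a.getD (n - 1 - k) 0 := by
    intro k hk
    rw [List.getD_eq_getElem _ 0 (by rw [hev]; exact hk),
      List.getD_eq_getElem a 0 (by omega : n - 1 - k < a.length)]
    rw [List.getElem_take, List.getElem_reverse]
  have hodget : ∀ k : Nat, k < n / 2 →
      (a.take (n / 2)).getD k 0 = a.getD k 0 := by
    intro k hk
    rw [List.getD_eq_getElem _ 0 (by rw [hod]; exact hk),
      List.getD_eq_getElem a 0 (by omega : k < a.length)]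
    rw [List.getElem_take]
  rw [hod]
  have hbody : (List.range (n / 2)).flatMap
        (fun k => [(a.reverse.take ((n + 1) / 2)).getD k 0, (a.take (n / 2)).getD k 0])
      = (List.range (n / 2)).flatMap
        (fun k => [a.getD (n - 1 - k) 0, a.getD k 0]) := by
    apply List.flatMap_congr
    intro k hk
    have hk' : k < n / 2 := List.mem_range.mp hk
    rw [hevget k (by omega), hodget k hk']
  rw [hbody, hev]
  by_cases hpar : n % 2 = 0
  · rw [if_neg (by omega), if_pos hpar]
  · rw [if_pos (by omega), if_neg hpar]
    have : n - 1 - n / 2 = n / 2 := by omega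
    rw [hevget (n / 2) (by omega), this]

-- ===== VERDICT (by name: the statement is the Claim_ definition above) =====
theorem quest1_spec : Claim_equal_quest1 := by
  intro a _
  unfold Spec_quest1
  rw [quest1_eq_spec, alt_eq_spec]
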